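-- pv_equiv track=rewrite | github.com/Mohd-Afzaal/Leetcoder | solutions/2260-Minimum-Consecutive-Cards-to-Pick-Up.py | minimumCardPickup
-- ===== SOURCE A (Python) =====
-- from typing import List
--
-- def minimumCardPickup(cards: List[int]) -> int:
--     seen = {}
--     left = 0
--     min_size = len(cards)+1
--     for right in range(len(cards)):
--         if cards[right] in seen :
--             min_size = min(min_size,(right - seen[cards[right]])+1)
--
--         seen[cards[right]] = right
--     if min_size == len(cards)+1:
--         return -1
--     return min_size
-- ===== SOURCE B (Python) =====
-- from typing import List
--
-- def minimumCardPickup(cards: List[int]) -> int: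
--     groups = {}
--     for i, v in enumerate(cards):
--         groups.setdefault(v, []).append(i)
--     best = None
--     for idx in groups.values():
--         for prev, cur in zip(idx, idx[1:]):
--             w = cur - prev + 1
--             if best is None or w < best:
--                 best = w
--     return -1 if best is None else best
-- ===== Notes on version B (the rewrite author's own statement) =====
-- stated objective: alternative
-- what changed: A's single pass keeping a last-seen-index dict and a running minimum is replaced by a two-phase decomposition: one pass groups all occurrence indices per card value into a dict of lists, then a second pass takes the minimum window over consecutive indices within each group.
import Mathlib
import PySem

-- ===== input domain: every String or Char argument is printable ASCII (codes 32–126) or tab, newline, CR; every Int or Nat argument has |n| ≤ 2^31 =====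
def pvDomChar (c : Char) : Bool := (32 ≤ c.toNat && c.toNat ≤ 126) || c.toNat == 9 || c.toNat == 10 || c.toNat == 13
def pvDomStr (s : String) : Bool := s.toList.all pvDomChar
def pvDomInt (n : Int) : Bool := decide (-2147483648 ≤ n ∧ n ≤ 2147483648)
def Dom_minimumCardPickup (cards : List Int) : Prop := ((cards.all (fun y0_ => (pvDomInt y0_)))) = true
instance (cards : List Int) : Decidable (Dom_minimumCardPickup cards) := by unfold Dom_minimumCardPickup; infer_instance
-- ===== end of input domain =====

-- B replaces A's single last-seen-dict pass by a group-then-scan decomposition: one pass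
-- builds value -> list of indices, a second pass minimises the window over consecutive
-- indices within each group (objective: alternative; same asymptotic cost as A).

-- ===== PORT A =====
def minimumCardPickup (cards : List Int) : Int :=
  let n : Int := (cards.length : Int)
  let st := (PySem.List.pyRange 0 n 1).foldl
    (fun (st : PySem.Dict Int Int × Int) (right : Int) =>
      let c := PySem.List.pyGetD cards right 0
      let ms := match st.1.get? c with
        | some j => min st.2 (right - j + 1)
        | none => st.2
      (st.1.insert c right, ms))
    (PySem.Dict.empty, n + 1)
  if st.2 = n + 1 then -1 else st.2

-- ===== PORT B =====
def minimumCardPickup_alt (cards : List Int) : Int :=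
  let groups : PySem.Dict Int (List Int) :=
    (PySem.List.enumerate cards 0).foldl
      (fun d p => d.modify p.2 [] (fun l => l ++ [p.1])) PySem.Dict.empty
  let best : Option Int :=
    groups.values.foldl
      (fun b idx =>
        (idx.zip idx.tail).foldl
          (fun b q =>
            let w := q.2 - q.1 + 1
            match b with
            | none => some w
            | some m => if w < m then some w else some m) b)
      none
  match best with
  | none => -1
  | some m => m

-- ===== PRECONDITION & SPEC =====
def Spec_minimumCardPickup (cards : List Int) (out : Int) : Prop := out = minimumCardPickup_alt cards
instance (cards : List Int) (out : Int) : Decidable (Spec_minimumCardPickup cards out) := by unfold Spec_minimumCardPickup; infer_instance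

-- ===== CLAIM (what is proved, stated in full; the proofs are below) =====
def Claim_equal_minimumCardPickup : Prop := ∀ (cards : List Int), Dom_minimumCardPickup cards → Spec_minimumCardPickup cards (minimumCardPickup cards)

-- ===== LEMMAS AND PROOFS =====

-- indices (as Ints, in order) at which value v occurs in cards
def pvGrp (cards : List Int) (v : Int) : List Int :=
  ((PySem.List.enumerate cards 0).filter (fun p => p.2 == v)).map (·.1)

-- window lengths of consecutive occurrences within one index list
def pvGaps (l : List Int) : List Int :=
  (l.zip l.tail).map (fun q => q.2 - q.1 + 1)

-- all candidate window lengths, grouped by value (first-occurrence order)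
def pvGflat (cards : List Int) : List Int :=
  ((PySem.Set.ofList cards).map (fun v => pvGaps (pvGrp cards v))).flatten

-- B's running-minimum step
def pvOptMin (b : Option Int) (w : Int) : Option Int :=
  match b with
  | none => some w
  | some m => if w < m then some w else some m

-- A's loop step, re-expressed over an enumerate pair
def pvAStep (st : PySem.Dict Int Int × Int) (p : Int × Int) : PySem.Dict Int Int × Int :=
  (st.1.insert p.2 p.1,
   match st.1.get? p.2 with
   | some j => min st.2 (p.1 - j + 1)
   | none => st.2)

lemma pvGrp_append (xs : List Int) (c v : Int) :
    pvGrp (xs ++ [c]) v = pvGrp xs v ++ (if v = c then [(xs.length : Int)] else []) := by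
  simp only [pvGrp, PySem.List.enumerate_append, PySem.List.enumerate_cons,
    PySem.List.enumerate_nil, List.filter_append, List.map_append]
  congr 1
  by_cases h : v = c
  · subst h; simp [List.filter]
  · have hb : (c == v) = false := by simp [Ne.symm h]
    simp [List.filter, hb]
    exact h

lemma pvGrp_eq_nil_iff (xs : List Int) (c : Int) : pvGrp xs c = [] ↔ c ∉ xs := by
  rw [pvGrp, List.map_eq_nil_iff, List.filter_eq_nil_iff]
  constructor
  · intro h hc
    have : c ∈ (PySem.List.enumerate xs 0).map (·.2) := by
      rw [PySem.List.map_snd_enumerate]; exact hc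
    obtain ⟨p, hp, he⟩ := List.mem_map.mp this
    exact (by simpa [he] using h p hp)
  · intro h p hp hpc
    apply h
    have : p.2 ∈ (PySem.List.enumerate xs 0).map (·.2) := List.mem_map_of_mem hp
    rw [PySem.List.map_snd_enumerate] at this
    simpa [show p.2 = c by simpa using hpc] using this

lemma pvGaps_concat (l : List Int) (x : Int) :
    pvGaps (l ++ [x]) = pvGaps l ++ (l.getLast?.elim [] (fun a => [x - a + 1])) := by
  induction l with
  | nil => simp [pvGaps]
  | cons a t ih =>
    cases t with
    | nil => simp [pvGaps]
    | cons b t' =>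
      simp only [pvGaps, List.cons_append, List.tail_cons, List.zip_cons_cons, List.map_cons,
        List.getLast?_cons_cons] at ih ⊢
      rw [ih]

lemma pvMem_grp_bound (cards : List Int) (v e : Int) (h : e ∈ pvGrp cards v) :
    0 ≤ e ∧ e ≤ (cards.length : Int) - 1 := by
  simp only [pvGrp, List.mem_map, List.mem_filter] at h
  obtain ⟨p, ⟨hp, _⟩, he⟩ := h
  obtain ⟨k, hk, hpk⟩ := (PySem.List.mem_enumerate_iff cards 0 p).mp hp
  subst hpk
  simp only at he
  omega

lemma pvGap_bound (cards : List Int) (g : Int) (h : g ∈ pvGflat cards) :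
    g ≤ (cards.length : Int) := by
  simp only [pvGflat, List.mem_flatten, List.mem_map] at h
  obtain ⟨l, ⟨v, _, hl⟩, hg⟩ := h
  subst hl
  simp only [pvGaps, List.mem_map] at hg
  obtain ⟨q, hq, hgq⟩ := hg
  obtain ⟨h1, h2⟩ := List.of_mem_zip (show (q.1, q.2) ∈ _ from hq)
  have hb1 := pvMem_grp_bound cards v q.1 h1
  have hb2 := pvMem_grp_bound cards v q.2 (List.mem_of_mem_tail h2)
  omega

lemma pvSet_ofList_concat (xs : List Int) (c : Int) :
    PySem.Set.ofList (xs ++ [c]) =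
      (if c ∈ xs then PySem.Set.ofList xs else PySem.Set.ofList xs ++ [c]) := by
  rw [PySem.Set.ofList_eq_foldl, List.foldl_append, ← PySem.Set.ofList_eq_foldl]
  show PySem.Set.add (PySem.Set.ofList xs) c = _
  by_cases h : c ∈ xs
  · simp [PySem.Set.add, (PySem.Set.mem_ofList xs c).mpr h, h]
  · simp [PySem.Set.add, h]

lemma pvOptMin_some (G : List Int) (m : Int) :
    G.foldl pvOptMin (some m) = some (G.foldl min m) := by
  induction G generalizing m with
  | nil => rfl
  | cons g t ih =>
    simp only [List.foldl_cons, pvOptMin]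
    rw [show (if g < m then some g else some m) = some (min m g) by
      rw [min_def]; split_ifs <;> first | rfl | omega]
    exact ih (min m g)

lemma pvFoldl_min_elim (G : List Int) (a : Int) :
    G.foldl min a = (G.foldl pvOptMin none).elim a (min a) := by
  cases G with
  | nil => rfl
  | cons g t =>
    simp only [List.foldl_cons]
    rw [show pvOptMin none g = some g from rfl, pvOptMin_some, Option.elim]
    exact List.foldl_assoc

lemma pvfoldl_min_out (F : List Int) (X g : Int) :
    F.foldl min (min X g) = min (F.foldl min X) g := by
  induction F generalizing X with
  | nil => rfl
  | cons a F ih =>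
    simp only [List.foldl_cons]
    rw [show min (min X g) a = min (min X a) g from min_right_comm X g a, ih]

lemma pvInv (cards : List Int) (m0 : Int) :
    (∀ v, ((PySem.List.enumerate cards 0).foldl pvAStep (PySem.Dict.empty, m0)).1.get? v
            = (pvGrp cards v).getLast?)
    ∧ ((PySem.List.enumerate cards 0).foldl pvAStep (PySem.Dict.empty, m0)).2
        = (pvGflat cards).foldl min m0 := by
  induction cards using List.reverseRecOn with
  | nil =>
    constructor
    · intro v
      simp [PySem.List.enumerate_nil, pvGrp, PySem.Dict.get?_empty]
    · simp [PySem.List.enumerate_nil, pvGflat, PySem.Set.ofList]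
  | append_singleton xs c ih =>
    obtain ⟨ihs, ihm⟩ := ih
    rw [PySem.List.enumerate_append, List.foldl_append]
    simp only [PySem.List.enumerate_cons, PySem.List.enumerate_nil, List.foldl_cons,
      List.foldl_nil]
    set st := (PySem.List.enumerate xs 0).foldl pvAStep (PySem.Dict.empty, m0) with hst
    have hL : (0 : Int) + (xs.length : Int) = (xs.length : Int) := by omega
    rw [hL]
    constructor
    · intro v
      rw [show (pvAStep st ((xs.length : Int), c)).1 = st.1.insert c (xs.length : Int) from rfl]
      rw [PySem.Dict.get?_insert, pvGrp_append]
      by_cases hv : v = c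
      · simp [hv]
      · simp [hv, ihs v]
    · rw [show (pvAStep st ((xs.length : Int), c)).2 =
        (match st.1.get? c with
         | some j => min st.2 ((xs.length : Int) - j + 1)
         | none => st.2) from rfl]
      simp only [ihs c, ihm]
      by_cases hc : c ∈ xs
      · -- c occurred before: one new gap
        have hne : pvGrp xs c ≠ [] := by
          rw [ne_eq, pvGrp_eq_nil_iff]; simpa using hc
        obtain ⟨j, hj⟩ := Option.ne_none_iff_exists'.mp (mt List.getLast?_eq_none_iff.mp hne)
        simp only [hj]
        have hcs : c ∈ PySem.Set.ofList xs := (PySem.Set.mem_ofList xs c).mpr hc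
        obtain ⟨V1, V2, hV⟩ := List.append_of_mem hcs
        have hnd : (PySem.Set.ofList xs).Nodup := PySem.Set.nodup_ofList xs
        rw [hV] at hnd
        rw [List.nodup_append] at hnd
        have hc1 : ∀ v ∈ V1, v ≠ c := fun v hv => hnd.2.2 v hv c (List.mem_cons_self ..)
        have hc2 : ∀ v ∈ V2, v ≠ c := fun v hv hvc => by
          have := hnd.2.1
          rw [List.nodup_cons] at this
          exact this.1 (hvc ▸ hv)
        have hset : PySem.Set.ofList (xs ++ [c]) = PySem.Set.ofList xs := by
          rw [pvSet_ofList_concat]; simp [hc]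
        have hmap1 : ∀ (V : List Int), (∀ v ∈ V, v ≠ c) →
            V.map (fun v => pvGaps (pvGrp (xs ++ [c]) v)) = V.map (fun v => pvGaps (pvGrp xs v)) := by
          intro V hV'
          apply List.map_congr_left
          intro v hv
          rw [pvGrp_append, if_neg (hV' v hv), List.append_nil]
        have hgapsc : pvGaps (pvGrp (xs ++ [c]) c) = pvGaps (pvGrp xs c) ++ [(xs.length : Int) - j + 1] := by
          rw [pvGrp_append, if_pos rfl, pvGaps_concat, hj]
          rfl
        conv_rhs => rw [pvGflat, hset, hV, List.map_append, List.map_cons,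
          hmap1 V1 hc1, hmap1 V2 hc2, hgapsc, List.flatten_append, List.flatten_cons]
        conv_lhs => rw [pvGflat, hV, List.map_append, List.map_cons, List.flatten_append,
          List.flatten_cons]
        rw [List.foldl_append, List.foldl_append, List.foldl_append, List.foldl_append,
          List.foldl_append, List.foldl_cons, List.foldl_nil]
        rw [pvfoldl_min_out]
      · -- first occurrence of c: no new gap
        have hnil : pvGrp xs c = [] := (pvGrp_eq_nil_iff xs c).mpr hc
        rw [hnil]
        simp only [List.getLast?_nil]
        have hset : PySem.Set.ofList (xs ++ [c]) = PySem.Set.ofList xs ++ [c] := by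
          rw [pvSet_ofList_concat]; simp [hc]
        have hmap1 : (PySem.Set.ofList xs).map (fun v => pvGaps (pvGrp (xs ++ [c]) v))
            = (PySem.Set.ofList xs).map (fun v => pvGaps (pvGrp xs v)) := by
          apply List.map_congr_left
          intro v hv
          have hvc : v ≠ c := fun h => hc (h ▸ (PySem.Set.mem_ofList xs v).mp hv)
          rw [pvGrp_append, if_neg hvc, List.append_nil]
        have hgapsc : pvGaps (pvGrp (xs ++ [c]) c) = [] := by
          rw [pvGrp_append, if_pos rfl, hnil]
          rfl
        conv_rhs => rw [pvGflat, hset, List.map_append, List.map_cons, List.map_nil, hmap1,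
          hgapsc, List.flatten_append]
        simp [pvGflat]

lemma pvA_char (cards : List Int) :
    minimumCardPickup cards =
      (if (pvGflat cards).foldl min ((cards.length : Int) + 1) = (cards.length : Int) + 1
       then -1 else (pvGflat cards).foldl min ((cards.length : Int) + 1)) := by
  have key : ((PySem.List.enumerate cards 0).foldl pvAStep
        (PySem.Dict.empty, (cards.length : Int) + 1))
      = (PySem.List.pyRange 0 ((cards.length : Int)) 1).foldl
          (fun (st : PySem.Dict Int Int × Int) (right : Int) =>
            let c := PySem.List.pyGetD cards right 0
            let ms := match st.1.get? c with
              | some j => min st.2 (right - j + 1)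
              | none => st.2
            (st.1.insert c right, ms))
          (PySem.Dict.empty, (cards.length : Int) + 1) := by
    rw [PySem.List.enumerate_eq_map_pyRange cards 0, List.foldl_map]
    rfl
  simp only [minimumCardPickup]
  rw [← key, (pvInv cards ((cards.length : Int) + 1)).2]

lemma pvB_char (cards : List Int) :
    minimumCardPickup_alt cards =
      (match (pvGflat cards).foldl pvOptMin none with
       | none => -1
       | some m => m) := by
  have hnd : ((PySem.List.enumerate cards 0).foldl
      (fun d p => d.modify p.2 [] (fun l => l ++ [p.1])) PySem.Dict.empty).keys.Nodup :=
    PySem.Dict.nodup_keys_foldl_modify_key (l := PySem.List.enumerate cards 0)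
      (key := fun p : Int × Int => p.2) (d0 := ([] : List Int))
      (f := fun (_ : PySem.Dict Int (List Int)) (p : Int × Int) (l : List Int) => l ++ [p.1])
      PySem.Dict.empty PySem.Dict.nodup_keys_empty
  have hkeys : ((PySem.List.enumerate cards 0).foldl
      (fun d p => d.modify p.2 [] (fun l => l ++ [p.1])) PySem.Dict.empty).keys
      = PySem.Set.ofList cards := by
    rw [PySem.Dict.keys_foldl_modify_key (l := PySem.List.enumerate cards 0)
      (key := fun p : Int × Int => p.2) (d0 := ([] : List Int))
      (f := fun (_ : PySem.Dict Int (List Int)) (p : Int × Int) (l : List Int) => l ++ [p.1])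
      PySem.Dict.empty,
      PySem.Dict.keys_empty, PySem.List.map_snd_enumerate, PySem.Set.ofList_eq_foldl]
    rfl
  have hgetD : ∀ v, ((PySem.List.enumerate cards 0).foldl
      (fun d p => d.modify p.2 [] (fun l => l ++ [p.1])) PySem.Dict.empty).getD v []
      = pvGrp cards v := by
    intro v
    rw [show ((PySem.List.enumerate cards 0).foldl
        (fun d p => d.modify p.2 [] (fun l => l ++ [p.1])) PySem.Dict.empty)
      = (((PySem.List.enumerate cards 0).map Prod.swap).foldl
          (fun d q => d.modify q.1 [] (fun l => l ++ [q.2])) PySem.Dict.empty) by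
        rw [List.foldl_map]
        rfl]
    rw [PySem.Dict.getD_foldl_modify_append, PySem.Dict.getD_empty, List.filter_map,
      List.map_map]
    rfl
  have hinner : ∀ (b : Option Int) (idx : List Int),
      (idx.zip idx.tail).foldl
        (fun b q =>
          let w := q.2 - q.1 + 1
          match b with
          | none => some w
          | some m => if w < m then some w else some m) b
      = (pvGaps idx).foldl pvOptMin b := by
    intro b idx
    rw [pvGaps, List.foldl_map]
    rfl
  simp only [minimumCardPickup_alt]
  rw [PySem.Dict.values_eq_map_keys _ hnd [], hkeys, List.foldl_map]
  have hcong := PySem.List.foldl_congr_mem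
    (l := PySem.Set.ofList cards)
    (f := fun (b : Option Int) v =>
      ((((PySem.List.enumerate cards 0).foldl
        (fun d p => d.modify p.2 [] (fun l => l ++ [p.1])) PySem.Dict.empty).getD v []).zip
        (((PySem.List.enumerate cards 0).foldl
        (fun d p => d.modify p.2 [] (fun l => l ++ [p.1])) PySem.Dict.empty).getD v []).tail).foldl
          (fun b q =>
            let w := q.2 - q.1 + 1
            match b with
            | none => some w
            | some m => if w < m then some w else some m) b)
    (g := fun (b : Option Int) v => (pvGaps (pvGrp cards v)).foldl pvOptMin b)
    (init := none)
    (by intro b v _; dsimp only; rw [hgetD v, hinner])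
  rw [hcong, pvGflat, List.foldl_flatten, List.foldl_map]

-- ===== VERDICT (by name: the statement is the Claim_ definition above) =====
theorem minimumCardPickup_spec : Claim_equal_minimumCardPickup := by
  intro cards _
  unfold Spec_minimumCardPickup
  rw [pvA_char, pvB_char, pvFoldl_min_elim]
  cases hG : (pvGflat cards).foldl pvOptMin none with
  | none => simp
  | some m =>
    have hmem : m ≤ (cards.length : Int) := by
      cases G : pvGflat cards with
      | nil => simp [G] at hG
      | cons g t =>
        rw [G] at hG
        simp only [List.foldl_cons, pvOptMin] at hG
        rw [pvOptMin_some] at hG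
        have hm : t.foldl min g = m := by simpa using hG
        have : m = g ∨ m ∈ t := hm ▸ PySem.List.foldl_min_mem t g
        have hmemG : m ∈ pvGflat cards := by
          rw [G]; rcases this with h | h
          · simp [h]
          · exact List.mem_cons_of_mem _ h
        exact pvGap_bound cards m hmemG
    have h1 : min ((cards.length : Int) + 1) m = m := by omega
    have h2 : m ≠ (cards.length : Int) + 1 := by omega
    simp [h1, h2]
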